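-- pv_equiv track=rewrite | github.com/vanshikatyagii/capstone | capstone_backend/v2_pipeline.py | _build_clause_body
-- ===== SOURCE A (Python) =====
-- PRIORITY_CLAUSES = [
--     "Parties", "Effective Date", "Governing Law",
--     "Termination for Convenience", "Confidentiality",
--     "Payment Terms", "Limitation of Liability",
--     "Indemnification", "IP Ownership Assignment",
-- ]
--
-- def _build_clause_body(clause_spans: dict) -> str:
--     ordered = [k for k in PRIORITY_CLAUSES if k in clause_spans]
--     rest    = [k for k in clause_spans if k not in PRIORITY_CLAUSES]
--     spans   = []
--     for k in ordered + rest: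
--         val = clause_spans[k]
--         spans.append(val["span"] if isinstance(val, dict) else val)
--     return " ".join(spans)
-- ===== SOURCE B (Python) =====
-- PRIORITY_CLAUSES = [
--     "Parties", "Effective Date", "Governing Law",
--     "Termination for Convenience", "Confidentiality",
--     "Payment Terms", "Limitation of Liability",
--     "Indemnification", "IP Ownership Assignment",
-- ]
--
-- def _build_clause_body(clause_spans: dict) -> str:
--     # One stable sort of the keys: priority keys get their PRIORITY index,
--     # everything else shares the maximal sentinel so insertion order is kept.
--     sentinel = len(PRIORITY_CLAUSES)
--     order = sorted(
--         clause_spans,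
--         key=lambda k: PRIORITY_CLAUSES.index(k) if k in PRIORITY_CLAUSES else sentinel,
--     )
--     return " ".join(
--         clause_spans[k]["span"] if isinstance(clause_spans[k], dict) else clause_spans[k]
--         for k in order
--     )
-- ===== Notes on version B (the rewrite author's own statement) =====
-- stated objective: alternative
-- what changed: A builds the key order with two filtering comprehensions (priority keys present, then remaining dict keys) and concatenates them; B obtains the same order with one stable sort of the dict keys keyed by PRIORITY index with a maximal sentinel for non-priority keys, then joins the spans.
import Mathlib
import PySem

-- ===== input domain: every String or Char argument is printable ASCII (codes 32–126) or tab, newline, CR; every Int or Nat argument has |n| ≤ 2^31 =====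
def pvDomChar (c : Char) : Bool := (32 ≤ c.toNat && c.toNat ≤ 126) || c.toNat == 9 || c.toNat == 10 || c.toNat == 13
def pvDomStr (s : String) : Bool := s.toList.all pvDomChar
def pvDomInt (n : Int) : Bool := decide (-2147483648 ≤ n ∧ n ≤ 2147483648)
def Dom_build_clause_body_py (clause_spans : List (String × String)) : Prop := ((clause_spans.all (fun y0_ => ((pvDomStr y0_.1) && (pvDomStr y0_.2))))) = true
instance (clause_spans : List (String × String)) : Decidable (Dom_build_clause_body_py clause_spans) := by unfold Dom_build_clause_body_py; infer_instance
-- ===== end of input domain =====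

-- B replaces A's two filtering passes + concatenation with ONE stable sort of the dict keys
-- (priority keys keyed by their PRIORITY index, all others by the maximal sentinel): an
-- alternative decomposition of the same cost. Return-value equivalence; neither mutates its input.

-- ===== PORT A =====
def pvPRIORITY : List String :=
  ["Parties", "Effective Date", "Governing Law",
   "Termination for Convenience", "Confidentiality",
   "Payment Terms", "Limitation of Liability",
   "Indemnification", "IP Ownership Assignment"]

-- Under the type convention the dict's values are strings, so `isinstance(val, dict)` is
-- always False and the loop appends `val` itself; dict lookup = first match in the assoc list.
def build_clause_body_py (clause_spans : List (String × String)) : String :=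
  let ordered := pvPRIORITY.filter (fun k => (clause_spans.map Prod.fst).contains k)
  let rest := (clause_spans.map Prod.fst).filter (fun k => !(pvPRIORITY.contains k))
  let spans := (ordered ++ rest).foldl
    (fun acc k => acc ++ [(List.lookup k clause_spans).getD ""]) []
  PySem.Str.join " " spans

-- ===== PORT B =====
-- the sort key of Source B: PRIORITY_CLAUSES.index(k) if k in PRIORITY_CLAUSES else sentinel
def pvKeyOf (k : String) : Int :=
  if pvPRIORITY.contains k then (((PySem.List.index? pvPRIORITY k).getD 0 : Nat) : Int)
  else (pvPRIORITY.length : Int)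

def build_clause_body_py_alt (clause_spans : List (String × String)) : String :=
  let order := PySem.List.sorted (clause_spans.map Prod.fst) pvKeyOf
  PySem.Str.join " " (order.map (fun k => (List.lookup k clause_spans).getD ""))

-- ===== PRECONDITION & SPEC =====
-- Pre_ excludes association lists with duplicate keys: they do not represent any Python
-- dict (dict keys are unique), so A never sees them; the two ports may disagree there.
def Pre_build_clause_body_py (clause_spans : List (String × String)) : Prop :=
  (clause_spans.map Prod.fst).Nodup
instance (clause_spans : List (String × String)) : Decidable (Pre_build_clause_body_py clause_spans) := by unfold Pre_build_clause_body_py; infer_instance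

def pvWitness_build_clause_body_py : (List (String × String)) :=
  [("Zeta clause", "z span"), ("Parties", "p span"), ("Payment Terms", "t span")]

def Spec_build_clause_body_py (clause_spans : List (String × String)) (out : String) : Prop := out = build_clause_body_py_alt clause_spans
instance (clause_spans : List (String × String)) (out : String) : Decidable (Spec_build_clause_body_py clause_spans out) := by unfold Spec_build_clause_body_py; infer_instance

-- ===== CLAIM (what is proved, stated in full; the proofs are below) =====
def Claim_equal_build_clause_body_py : Prop := ∀ (clause_spans : List (String × String)), Dom_build_clause_body_py clause_spans → Pre_build_clause_body_py clause_spans → Spec_build_clause_body_py clause_spans (build_clause_body_py clause_spans)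

-- ===== LEMMAS AND PROOFS =====

-- insertBy walks past every element it is not `before`
theorem pv_insertBy_append {α : Type} (before : α → α → Bool) (x : α) (l1 l2 : List α)
    (h : ∀ y ∈ l1, before x y = false) :
    PySem.List.insertBy before x (l1 ++ l2) = l1 ++ PySem.List.insertBy before x l2 := by
  induction l1 with
  | nil => simp
  | cons a t ih =>
    have ha : before x a = false := h a (by simp)
    simp [PySem.List.insertBy, ha]
    exact ih (fun y hy => h y (by simp [hy]))

-- insertBy stops at once when it is `before` everything
theorem pv_insertBy_front {α : Type} (before : α → α → Bool) (x : α) (l : List α)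
    (h : ∀ y ∈ l, before x y = true) :
    PySem.List.insertBy before x l = x :: l := by
  cases l with
  | nil => rfl
  | cons a t => simp [PySem.List.insertBy, h a (by simp)]

theorem pv_insertBy_bucket {α : Type} (key : α → Int) (N : ℕ) (x : α) (ys : List α)
    (hx : ∃ j : ℕ, j < N ∧ key x = (j : Int)) :
    PySem.List.insertBy (fun a b => decide (key a < key b)) x
      ((List.range N).flatMap (fun (i : ℕ) => ys.filter (fun y => key y == (i : Int))))
    = (List.range N).flatMap (fun (i : ℕ) => (ys ++ [x]).filter (fun y => key y == (i : Int))) := by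
  obtain ⟨j, hjN, hkx⟩ := hx
  have hN : N = (j + 1) + (N - (j + 1)) := by omega
  rw [hN, List.range_add, List.flatMap_append, List.flatMap_append]
  have hfront : ∀ y ∈ (List.range (j + 1)).flatMap (fun (i : ℕ) => ys.filter (fun y => key y == (i : Int))),
      decide (key x < key y) = false := by
    intro y hy
    simp only [List.mem_flatMap, List.mem_range, List.mem_filter, beq_iff_eq] at hy
    obtain ⟨i, hij, _, hkey⟩ := hy
    simp only [decide_eq_false_iff_not, not_lt, hkx, hkey]
    exact_mod_cast Nat.le_of_lt_succ hij
  have htail : ∀ y ∈ (List.map (fun i => j + 1 + i) (List.range (N - (j + 1)))).flatMap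
      (fun (i : ℕ) => ys.filter (fun y => key y == (i : Int))),
      decide (key x < key y) = true := by
    intro y hy
    simp only [List.mem_flatMap, List.mem_map, List.mem_filter, beq_iff_eq] at hy
    obtain ⟨i, ⟨i', _, hi'⟩, _, hkey⟩ := hy
    simp only [decide_eq_true_eq, hkx, hkey]
    exact_mod_cast (by omega : j < i)
  rw [pv_insertBy_append _ _ _ _ hfront, pv_insertBy_front _ _ _ htail]
  have htailEq : (List.map (fun i => j + 1 + i) (List.range (N - (j + 1)))).flatMap
      (fun (i : ℕ) => (ys ++ [x]).filter (fun y => key y == (i : Int)))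
      = (List.map (fun i => j + 1 + i) (List.range (N - (j + 1)))).flatMap
      (fun (i : ℕ) => ys.filter (fun y => key y == (i : Int))) := by
    apply List.flatMap_congr
    intro i hi
    simp only [List.mem_map, List.mem_range] at hi
    obtain ⟨i', _, hi'⟩ := hi
    rw [List.filter_append]
    have : (key x == (i : Int)) = false := by
      simp only [beq_eq_false_iff_ne, ne_eq, hkx, ← hi']
      intro hc
      have : j = j + 1 + i' := by exact_mod_cast hc
      omega
    simp [List.filter, this]
  have hheadEq : (List.range (j + 1)).flatMap (fun (i : ℕ) => (ys ++ [x]).filter (fun y => key y == (i : Int)))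
      = (List.range (j + 1)).flatMap (fun (i : ℕ) => ys.filter (fun y => key y == (i : Int))) ++ [x] := by
    rw [List.range_succ, List.flatMap_append, List.flatMap_append]
    have hlt : ∀ i ∈ List.range j, (ys ++ [x]).filter (fun y => key y == (i : Int))
        = ys.filter (fun y => key y == (i : Int)) := by
      intro i hi
      rw [List.mem_range] at hi
      rw [List.filter_append]
      have : (key x == (i : Int)) = false := by
        simp only [beq_eq_false_iff_ne, ne_eq, hkx]
        intro hc
        have : j = i := by exact_mod_cast hc
        omega
      simp [List.filter, this]
    rw [List.flatMap_congr hlt]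
    simp [hkx]
  rw [htailEq, hheadEq]
  simp


theorem pv_sorted_bucket {α : Type} (key : α → Int) (N : ℕ) (xs : List α)
    (hb : ∀ x ∈ xs, ∃ j : ℕ, j < N ∧ key x = (j : Int)) :
    PySem.List.sorted xs key
    = (List.range N).flatMap (fun (i : ℕ) => xs.filter (fun y => key y == (i : Int))) := by
  rw [PySem.List.sorted_eq_foldl_insertBy]
  have main : ∀ (zs ys : List α), (∀ x ∈ zs, ∃ j : ℕ, j < N ∧ key x = (j : Int)) →
      List.foldl (fun acc x => PySem.List.insertBy (fun a b => decide (key a < key b)) x acc)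
        ((List.range N).flatMap (fun (i : ℕ) => ys.filter (fun y => key y == (i : Int)))) zs
      = (List.range N).flatMap (fun (i : ℕ) => (ys ++ zs).filter (fun y => key y == (i : Int))) := by
    intro zs
    induction zs with
    | nil => intro ys _; simp
    | cons z t ih =>
      intro ys hz
      simp only [List.foldl_cons]
      rw [pv_insertBy_bucket key N z ys (hz z (by simp))]
      rw [ih (ys ++ [z]) (fun x hx => hz x (by simp [hx]))]
      simp
  have h0 := main xs [] hb
  have hnil : (List.range N).flatMap (fun (i : ℕ) => (([] : List α).filter (fun y => key y == (i : Int)))) = [] := by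
    simp
  rw [hnil] at h0
  exact h0

-- index? of the i-th element of a nodup list is i
theorem pv_index?_getElem {α : Type} [BEq α] [LawfulBEq α] (xs : List α) (h : xs.Nodup)
    (i : ℕ) (hi : i < xs.length) : PySem.List.index? xs xs[i] = some i := by
  have hmem : xs[i] ∈ xs := List.getElem_mem hi
  have hsome : (PySem.List.index? xs xs[i]).isSome := (PySem.List.index?_isSome_iff xs _).mpr hmem
  obtain ⟨m, hm⟩ := Option.isSome_iff_exists.mp hsome
  obtain ⟨hml, hxm, -⟩ := PySem.List.getElem_of_index?_eq_some hm
  have : m = i := by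
    have := List.Nodup.getElem_inj_iff h (hi := hml) (hj := hi)
    exact this.mp hxm
  rw [hm, this]

theorem pv_keyOf_mem (k : String) (hc : pvPRIORITY.contains k = true) :
    ∃ m : ℕ, m < 9 ∧ pvKeyOf k = (m : Int) ∧ pvPRIORITY.getD m "" = k := by
  have hmem : k ∈ pvPRIORITY := by simpa using hc
  obtain ⟨i, hi, rfl⟩ := List.getElem_of_mem hmem
  have hnd : pvPRIORITY.Nodup := by decide
  have hidx := pv_index?_getElem pvPRIORITY hnd i hi
  refine ⟨i, by simpa [pvPRIORITY] using hi, ?_, ?_⟩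
  · simp only [pvKeyOf, hc, if_true]
    rw [hidx]
    simp
  · exact List.getD_eq_getElem _ _ hi

theorem pv_keyOf_not_mem (k : String) (hc : pvPRIORITY.contains k = false) :
    pvKeyOf k = (9 : Int) := by
  simp only [pvKeyOf, hc, Bool.false_eq_true, if_false]
  decide

theorem pv_filter_eq_singleton {α : Type} [BEq α] [LawfulBEq α] (a : α) (ks : List α) (h : ks.Nodup) :
    ks.filter (fun k => k == a) = if ks.contains a then [a] else [] := by
  induction ks with
  | nil => simp
  | cons b t ih =>
    rw [List.nodup_cons] at h
    by_cases hba : b = a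
    · subst hba
      have : t.filter (fun k => k == b) = [] := by
        rw [List.filter_eq_nil_iff]
        intro x hx
        simp only [beq_iff_eq]
        exact fun hxb => h.1 (hxb ▸ hx)
      simp [this]
    · have := ih h.2
      simp [hba, this, Ne.symm hba]


theorem pv_keyOf_eq_iff (k : String) (i : ℕ) (hi : i < 9) :
    pvKeyOf k = (i : Int) ↔ k = pvPRIORITY.getD i "" := by
  have hlen : pvPRIORITY.length = 9 := by decide
  have hnd : pvPRIORITY.Nodup := by decide
  constructor
  · intro hk
    by_cases hc : pvPRIORITY.contains k = true
    · obtain ⟨m, hm9, hkm, hgd⟩ := pv_keyOf_mem k hc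
      have : m = i := by rw [hkm] at hk; exact_mod_cast hk
      rw [← hgd, this]
    · have := pv_keyOf_not_mem k (by simpa using hc)
      rw [this] at hk
      have : (9 : ℕ) = i := by exact_mod_cast hk
      omega
  · intro hk
    have hik : i < pvPRIORITY.length := by omega
    have hget : pvPRIORITY.getD i "" = pvPRIORITY[i] := List.getD_eq_getElem _ _ hik
    have hmem : k ∈ pvPRIORITY := by rw [hk, hget]; exact List.getElem_mem hik
    obtain ⟨m, hm9, hkm, hgd⟩ := pv_keyOf_mem k (by simpa using hmem)
    have hmg : pvPRIORITY.getD m "" = pvPRIORITY[m] := List.getD_eq_getElem _ _ (by omega)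
    have hge := hmg.symm.trans (hgd.trans (hk.trans hget))
    have : m = i := (List.Nodup.getElem_inj_iff hnd).mp hge
    rw [hkm, this]

theorem pv_bucket_lt (ks : List String) (h : ks.Nodup) (i : ℕ) (hi : i < 9)
    (a : String) (ha : pvPRIORITY.getD i "" = a) :
    ks.filter (fun k => pvKeyOf k == (i : Int))
    = if ks.contains a then [a] else [] := by
  have hcong : ∀ k ∈ ks, (pvKeyOf k == (i : Int)) = (k == a) := by
    intro k _
    rw [Bool.eq_iff_iff]
    simp only [beq_iff_eq]
    rw [← ha]
    exact pv_keyOf_eq_iff k i hi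
  rw [List.filter_congr hcong, pv_filter_eq_singleton _ ks h]

theorem pv_chain (P ks rest : List String) :
    P.foldr (fun a r => (if ks.contains a then [a] else []) ++ r) rest
    = P.filter (fun k => ks.contains k) ++ rest := by
  induction P with
  | nil => simp
  | cons a P ih =>
    simp only [List.foldr_cons, ih, List.filter_cons]
    by_cases hm : a ∈ ks <;> simp [hm]

theorem pv_bucket_nine (ks : List String) :
    ks.filter (fun k => pvKeyOf k == ((9 : ℕ) : Int)) = ks.filter (fun k => !(pvPRIORITY.contains k)) := by
  apply List.filter_congr
  intro k _
  rw [Bool.eq_iff_iff]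
  simp only [beq_iff_eq, Bool.not_eq_eq_eq_not, Bool.not_true]
  by_cases hc : pvPRIORITY.contains k = true
  · obtain ⟨m, hm9, hkm, -⟩ := pv_keyOf_mem k hc
    constructor
    · intro hk
      rw [hkm] at hk
      have : m = 9 := by exact_mod_cast hk
      omega
    · intro hk
      rw [hc] at hk
      exact absurd hk (by simp)
  · have hcf : pvPRIORITY.contains k = false := by simpa using hc
    simp [pv_keyOf_not_mem k hcf]
    simpa using hcf

theorem pv_key_order (ks : List String) (h : ks.Nodup) :
    PySem.List.sorted ks pvKeyOf
    = pvPRIORITY.filter (fun k => ks.contains k) ++ ks.filter (fun k => !(pvPRIORITY.contains k)) := by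
  have hb : ∀ k ∈ ks, ∃ j : ℕ, j < 10 ∧ pvKeyOf k = (j : Int) := by
    intro k _
    by_cases hc : pvPRIORITY.contains k = true
    · obtain ⟨m, hm9, hkm, -⟩ := pv_keyOf_mem k hc
      exact ⟨m, by omega, hkm⟩
    · exact ⟨9, by omega, pv_keyOf_not_mem k (by simpa using hc)⟩
  rw [pv_sorted_bucket pvKeyOf 10 ks hb]
  have h10 : List.range 10 = [0, 1, 2, 3, 4, 5, 6, 7, 8, 9] := by decide
  rw [h10]
  simp only [List.flatMap_cons, List.flatMap_nil, List.append_nil]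
  rw [pv_bucket_lt ks h 0 (by omega) "Parties" rfl,
      pv_bucket_lt ks h 1 (by omega) "Effective Date" rfl,
      pv_bucket_lt ks h 2 (by omega) "Governing Law" rfl,
      pv_bucket_lt ks h 3 (by omega) "Termination for Convenience" rfl,
      pv_bucket_lt ks h 4 (by omega) "Confidentiality" rfl,
      pv_bucket_lt ks h 5 (by omega) "Payment Terms" rfl,
      pv_bucket_lt ks h 6 (by omega) "Limitation of Liability" rfl,
      pv_bucket_lt ks h 7 (by omega) "Indemnification" rfl,
      pv_bucket_lt ks h 8 (by omega) "IP Ownership Assignment" rfl,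
      pv_bucket_nine ks]
  have hch := pv_chain pvPRIORITY ks (ks.filter (fun k => !(pvPRIORITY.contains k)))
  rw [show pvPRIORITY = ["Parties", "Effective Date", "Governing Law",
        "Termination for Convenience", "Confidentiality", "Payment Terms",
        "Limitation of Liability", "Indemnification", "IP Ownership Assignment"] from rfl] at hch
  simp only [List.foldr_cons, List.foldr_nil] at hch
  exact hch

-- ===== VERDICT (by name: the statement is the Claim_ definition above) =====
theorem build_clause_body_py_spec : Claim_equal_build_clause_body_py := by
  intro cs _ hpre
  unfold Spec_build_clause_body_py build_clause_body_py build_clause_body_py_alt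
  simp only [PySem.List.foldl_append_singleton_eq_map, List.nil_append]
  rw [pv_key_order (cs.map Prod.fst) hpre]
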